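-- pv_equiv track=rewrite | github.com/postvakje/oeis-sequences | oeis-sequences/OEISsequences.py | A071268
-- ===== SOURCE A (Python) =====
-- from functools import lru_cache, reduce
-- from math import factorial, floor, comb, prod, isqrt
-- from operator import mul, xor
--
-- def A071268(n):
--     s = "".join(str(i) for i in range(1, n + 1))
--     return (
--         sum(int(d) for d in s)
--         * factorial(len(s) - 1)
--         * (10 ** len(s) - 1)
--         // (9 * reduce(mul, (factorial(d) for d in (s.count(w) for w in set(s)))))
--     )
-- ===== SOURCE B (Python) =====
-- from math import factorial, prod
--
-- def digits_of(m):
--     # little-endian decimal digits of m > 0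
--     ds = []
--     while m > 0:
--         m, d = divmod(m, 10)
--         ds.append(d)
--     return ds
--
-- def digit_counts(n):
--     # counts[d] = number of occurrences of digit d in the decimal strings of
--     # 1..n, computed recursively on n // 10 (depth log10(n), never iterating
--     # over 1..n): the last digits of each block of ten and the prefixes,
--     # which are exactly the digits of 1..n//10 with block multiplicities.
--     if n <= 0:
--         return [0] * 10
--     if n < 10:
--         return [1 if 1 <= d <= n else 0 for d in range(10)]
--     q, r = divmod(n, 10)
--     sub = digit_counts(q - 1)
--     qd = digits_of(q)
--     return [
--         (1 if d >= 1 else 0) + (q - 1) + (1 if d <= r else 0)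
--         + 10 * sub[d] + (r + 1) * qd.count(d)
--         for d in range(10)
--     ]
--
-- def A071268(n):
--     counts = digit_counts(n)
--     total = sum(counts)
--     dsum = sum(d * counts[d] for d in range(10))
--     denom = prod(factorial(c) for c in counts)
--     return dsum * factorial(total - 1) * (10 ** total - 1) // (9 * denom)
-- ===== Notes on version B (the rewrite author's own statement) =====
-- stated objective: alternative
-- what changed: B never builds the concatenated string and never iterates over 1..n: it computes the ten digit frequencies of the concatenation by a recursion on n//10 (each level accounts for all blocks of ten at once, depth log10 n), then evaluates the same closed formula from that count vector; the evaluation of the big-integer formula dominates both programs, so no speed is claimed.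
import Mathlib
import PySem

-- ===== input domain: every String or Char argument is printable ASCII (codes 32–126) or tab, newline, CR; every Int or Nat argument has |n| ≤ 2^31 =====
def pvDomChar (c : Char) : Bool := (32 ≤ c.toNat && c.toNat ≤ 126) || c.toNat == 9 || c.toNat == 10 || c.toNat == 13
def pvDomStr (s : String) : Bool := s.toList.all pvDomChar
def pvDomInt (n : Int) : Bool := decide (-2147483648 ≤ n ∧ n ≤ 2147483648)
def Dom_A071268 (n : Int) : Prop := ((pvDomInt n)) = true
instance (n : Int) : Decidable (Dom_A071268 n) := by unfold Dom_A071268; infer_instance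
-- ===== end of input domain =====

-- B never enumerates 1..n: it computes the ten digit frequencies of the
-- concatenation by a recursion on n // 10 (depth log10 n), then evaluates the
-- same closed formula (objective: alternative, a different algorithm; the
-- big-integer formula evaluation dominates both, so no speed is claimed).

-- ===== PORT A =====
-- s = "".join(str(i) for i in range(1, n+1)); the string is kept as List Char.
-- int(d) for a single char is PySem.Int.ofChars? [d]; it is always `some` here
-- (every char of s is a decimal digit), so `.getD 0` never supplies its default.
-- factorial(len(s)-1) raises ValueError in Python when s = "" (n < 1); those
-- inputs are excluded by Pre_ (Nat subtraction `s.length - 1` is exact on Pre_).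
-- reduce(mul, …) over the factorials (TypeError on empty s, excluded by Pre_)
-- is the product; iteration order over set(s) cannot affect a product.
def A071268 (n : Int) : Int :=
  let s : List Char := ((PySem.List.pyRange 1 (n + 1)).map (fun i => PySem.Int.toChars i)).flatten
  let dsum : Int := (s.map (fun c => (PySem.Int.ofChars? [c]).getD 0)).sum
  let denom : Int := 9 * ((PySem.Set.ofList s).map (fun w => ((List.count w s).factorial : Int))).prod
  PySem.Int.floordiv (dsum * ((s.length - 1).factorial : Int) * ((10 : Int) ^ s.length - 1)) denom

-- ===== PORT B =====
-- digits_of(m): `while m > 0: m, d = divmod(m, 10); ds.append(d)` — the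
-- little-endian digit list, built least-significant first.
def pvDigitsOf (m : Int) : List Int :=
  if _h : m ≤ 0 then []
  else PySem.Int.mod m 10 :: pvDigitsOf (PySem.Int.floordiv m 10)
termination_by m.toNat
decreasing_by
  rw [PySem.Int.floordiv_eq_ediv_of_pos (by norm_num)]
  omega

-- digit_counts(n): the recursion on n // 10; sub[d] is in-range indexing
-- (sub always has length 10), ported as pyGetD; list.count is PySem.List.count.
def pvDigitCounts (n : Int) : List Int :=
  if h0 : n ≤ 0 then List.replicate 10 0
  else if h9 : n < 10 then
    (PySem.List.pyRange 0 10).map (fun d => if 1 ≤ d ∧ d ≤ n then (1 : Int) else 0)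
  else
    let q := PySem.Int.floordiv n 10
    let r := PySem.Int.mod n 10
    let sub := pvDigitCounts (q - 1)
    let qd := pvDigitsOf q
    (PySem.List.pyRange 0 10).map (fun d =>
      (if 1 ≤ d then (1 : Int) else 0) + (q - 1) + (if d ≤ r then (1 : Int) else 0)
      + 10 * PySem.List.pyGetD sub d 0 + (r + 1) * (PySem.List.count qd d : Int))
termination_by n.toNat
decreasing_by
  rw [PySem.Int.floordiv_eq_ediv_of_pos (by norm_num)]
  omega

-- counts → total / dsum / denom, then the same closed formula;
-- factorial(total - 1) raises ValueError in Python when total = 0 (n < 1),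
-- excluded by Pre_ (`(total - 1).toNat` is exact on Pre_).
def A071268_alt (n : Int) : Int :=
  let counts := pvDigitCounts n
  let total : Int := counts.sum
  let dsum : Int := ((PySem.List.pyRange 0 10).map (fun d => d * PySem.List.pyGetD counts d 0)).sum
  let denom : Int := (counts.map (fun c => (c.toNat.factorial : Int))).prod
  PySem.Int.floordiv (dsum * (((total - 1).toNat.factorial : Nat) : Int) * ((10 : Int) ^ total.toNat - 1)) (9 * denom)

-- ===== PRECONDITION & SPEC =====
-- Python A raises ValueError (factorial(-1), via len(s) = 0) exactly when n < 1;
-- B raises the same ValueError there (total = 0), so those inputs are outside Pre_.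
def Pre_A071268 (n : Int) : Prop := 1 ≤ n
instance (n : Int) : Decidable (Pre_A071268 n) := by unfold Pre_A071268; infer_instance
def pvWitness_A071268 : Int := 3
def Spec_A071268 (n : Int) (out : Int) : Prop := out = A071268_alt n
instance (n : Int) (out : Int) : Decidable (Spec_A071268 n out) := by unfold Spec_A071268; infer_instance

-- ===== CLAIM (what is proved, stated in full; the proofs are below) =====
def Claim_equal_A071268 : Prop := ∀ (n : Int), Dom_A071268 n → Pre_A071268 n → Spec_A071268 n (A071268 n)

-- ===== LEMMAS AND PROOFS =====

-- the digit-count of d over the decimal digit lists of 1..N (A's quantity)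
def pvCnt (d N : Nat) : Nat := (((List.range' 1 N).map (Nat.digits 10)).flatten).count d

-- splitting a range' at any point (step 1)
theorem pv_range'_split (a m n : Nat) : List.range' a (m + n) = List.range' a m ++ List.range' (a + m) n := by
  have h := List.range'_append (s := a) (m := m) (n := n) (step := 1)
  rw [one_mul] at h
  exact h.symm

theorem pvCnt_succ (d N : Nat) :
    pvCnt d (N + 1) = pvCnt d N + (Nat.digits 10 (N + 1)).count d := by
  unfold pvCnt
  rw [pv_range'_split 1 N 1, List.map_append, List.flatten_append, List.count_append]
  simp [Nat.add_comm 1 N]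

-- str(m) for 0 < m is the base-10 digit list, most significant first
theorem pv_toDigitsCore_eq (f : Nat) : ∀ (m : Nat) (acc : List Char), 0 < m → m < 10 ^ f →
    Nat.toDigitsCore 10 f m acc = ((Nat.digits 10 m).map Nat.digitChar).reverse ++ acc := by
  induction f with
  | zero => intro m acc hm hf; omega
  | succ f ih =>
    intro m acc hm hf
    rw [Nat.toDigitsCore]
    rw [Nat.digits_def' (by norm_num) hm]
    by_cases h : m / 10 = 0
    · simp [h]
    · simp only [h, if_false]
      rw [ih (m / 10) _ (Nat.pos_of_ne_zero h) (by
        rw [Nat.div_lt_iff_lt_mul (by norm_num : (0:Nat) < 10)]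
        calc m < 10 ^ (f + 1) := hf
          _ = 10 ^ f * 10 := by rw [pow_succ])]
      simp

theorem pv_toChars_pos (i : Int) (h : 0 < i) :
    PySem.Int.toChars i = ((Nat.digits 10 i.toNat).map Nat.digitChar).reverse := by
  have h2 : ¬ i < 0 := by omega
  rw [PySem.Int.toChars]
  simp only [h2, if_false]
  show Nat.toDigitsCore 10 (i.toNat + 1) i.toNat [] = _
  rw [pv_toDigitsCore_eq _ _ _ (by omega) (by
    calc i.toNat < 2 ^ i.toNat := Nat.lt_two_pow_self
    _ ≤ 10 ^ i.toNat := Nat.pow_le_pow_left (by norm_num) _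
    _ ≤ 10 ^ (i.toNat + 1) := Nat.pow_le_pow_right (by norm_num) (by omega))]
  simp

-- decimal-digit facts, decided once
theorem pv_val_digitChar : ∀ d ∈ List.range 10, (PySem.Int.ofChars? [Nat.digitChar d]).getD 0 = (d : Int) := by decide

theorem pv_dc_inj : ∀ a ∈ List.range 10, ∀ d ∈ List.range 10, (Nat.digitChar a = Nat.digitChar d ↔ a = d) := by decide

-- A-side aggregates of the concatenated char list, vs the flat digit list
theorem pv_A_agg (is : List Int) (hpos : ∀ i ∈ is, 0 < i) :
    let S := (is.map (fun i => PySem.Int.toChars i)).flatten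
    let ds := (is.map (fun i => Nat.digits 10 i.toNat)).flatten
    S.length = ds.length ∧
    (S.map (fun c => (PySem.Int.ofChars? [c]).getD 0)).sum = (ds.sum : Int) ∧
    (∀ d < 10, S.count (Nat.digitChar d) = ds.count d) ∧
    (∀ c ∈ S, ∃ d, d < 10 ∧ c = Nat.digitChar d) := by
  induction is with
  | nil => simp
  | cons i is ih =>
    intro S ds
    have hi : 0 < i := hpos i (by simp)
    obtain ⟨h1, h2, h3, h4⟩ := ih (fun j hj => hpos j (List.mem_cons_of_mem _ hj))
    have hlt : ∀ d ∈ Nat.digits 10 i.toNat, d < 10 := fun d hd => Nat.digits_lt_base (by norm_num) hd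
    have hS : S = ((Nat.digits 10 i.toNat).map Nat.digitChar).reverse
        ++ (is.map (fun i => PySem.Int.toChars i)).flatten := by
      simp [S, pv_toChars_pos i hi]
    have hds : ds = Nat.digits 10 i.toNat ++ (is.map (fun i => Nat.digits 10 i.toNat)).flatten := by
      simp [ds]
    refine ⟨?_, ?_, ?_, ?_⟩
    · simp [hS, hds, h1]
    · rw [hS, hds, List.map_append, List.sum_append, List.sum_append, h2,
        List.map_reverse, List.sum_reverse, List.map_map]
      have hm : ((Nat.digits 10 i.toNat).map ((fun c => (PySem.Int.ofChars? [c]).getD 0) ∘ Nat.digitChar))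
          = (Nat.digits 10 i.toNat).map (Nat.cast : Nat → Int) :=
        List.map_congr_left (fun d hd => pv_val_digitChar d (by simpa using hlt d hd))
      rw [hm]
      simp [Nat.cast_list_sum]
    · intro d hd
      rw [hS, hds, List.count_append, List.count_append, h3 d hd, List.count_reverse]
      congr 1
      rw [List.count_eq_countP, List.countP_map, List.count_eq_countP]
      apply List.countP_congr
      intro a ha
      simp only [Function.comp_apply, beq_iff_eq]
      exact pv_dc_inj a (by simpa using hlt a ha) d (by simpa using hd)
    · intro c hc
      rw [hS] at hc
      rcases List.mem_append.mp hc with hc | hc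
      · rw [List.mem_reverse] at hc
        obtain ⟨d, hd, rfl⟩ := List.mem_map.mp hc
        exact ⟨d, hlt d hd, rfl⟩
      · exact h4 c hc

-- A's product over set(s) equals the product over all ten digits
theorem pv_prod_eq (S : List Char) (ds : List Nat)
    (hcnt : ∀ d < 10, S.count (Nat.digitChar d) = ds.count d)
    (hmem : ∀ c ∈ S, ∃ d, d < 10 ∧ c = Nat.digitChar d) :
    ((PySem.Set.ofList S).map (fun w => ((List.count w S).factorial : Int))).prod
      = ((List.range 10).map (fun d => ((ds.count d).factorial : Int))).prod := by
  set f : Char → Int := fun w => ((List.count w S).factorial : Int) with hf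
  have hnd : (PySem.Set.ofList S).Nodup := PySem.Set.nodup_ofList S
  rw [← List.prod_toFinset f hnd,
      ← List.prod_toFinset (fun d => ((ds.count d).factorial : Int)) (List.nodup_range)]
  have htf : (PySem.Set.ofList S).toFinset = S.toFinset := by
    ext c; simp [List.mem_toFinset, PySem.Set.mem_ofList]
  rw [htf, List.toFinset_range]
  have hsub : S.toFinset ⊆ (Finset.range 10).image Nat.digitChar := by
    intro c hc
    obtain ⟨d, hd, rfl⟩ := hmem c (List.mem_toFinset.mp hc)
    exact Finset.mem_image.mpr ⟨d, Finset.mem_range.mpr hd, rfl⟩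
  rw [Finset.prod_subset hsub (by
    intro c hc hnc
    obtain ⟨d, hdm, rfl⟩ := Finset.mem_image.mp hc
    have : List.count (Nat.digitChar d) S = 0 := by
      rw [List.count_eq_zero]
      intro hmemS
      exact hnc (List.mem_toFinset.mpr hmemS)
    simp [this])]
  rw [Finset.prod_image (by
    intro a ha b hb hab
    exact (pv_dc_inj a (by simpa using ha) b (by simpa using hb)).mp hab)]
  apply Finset.prod_congr rfl
  intro d hd
  rw [hcnt d (Finset.mem_range.mp hd)]

-- pvDigitsOf on a positive Nat cast is the little-endian digit list
theorem pv_digitsOf_eq : ∀ (m : Nat), pvDigitsOf (m : Int) = (Nat.digits 10 m).map (Nat.cast : Nat → Int) := by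
  intro m
  induction m using Nat.strong_induction_on with
  | _ m ih =>
    rw [pvDigitsOf]
    by_cases h : m = 0
    · simp [h]
    · have hle : ¬ (m : Int) ≤ 0 := by omega
      simp only [hle, dif_neg, not_false_iff]
      rw [show ((10:Int)) = ((10:Nat):Int) by norm_num, PySem.Int.mod_natCast, PySem.Int.floordiv_natCast,
        ih (m / 10) (Nat.div_lt_self (Nat.pos_of_ne_zero h) (by norm_num)),
        Nat.digits_def' (by norm_num : (1:Nat) < 10) (Nat.pos_of_ne_zero h)]
      simp

-- one block 10m .. 10m+j-1 of the concatenation: j copies of the digits of m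
-- as prefixes, plus the last digits 0..j-1
theorem pv_block (m d : Nat) (hm : 1 ≤ m) (_hd : d < 10) : ∀ (j : Nat), j ≤ 10 →
    (((List.range' (10 * m) j).map (Nat.digits 10)).flatten).count d
      = j * (Nat.digits 10 m).count d + (if d < j then 1 else 0) := by
  intro j
  induction j with
  | zero => simp
  | succ j ih =>
    intro hj
    rw [pv_range'_split (10 * m) j 1, List.map_append, List.flatten_append, List.count_append,
      ih (by omega)]
    have hdig : Nat.digits 10 (10 * m + j) = j :: Nat.digits 10 m := by
      rw [Nat.digits_def' (by norm_num : (1:Nat) < 10) (by omega)]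
      congr 1
      · omega
      · congr 1
        omega
    simp only [List.range'_one, List.map_cons, List.map_nil, List.flatten_cons,
      List.flatten_nil, List.append_nil]
    rw [hdig, List.count_cons, Nat.succ_mul]
    simp only [beq_iff_eq]
    split_ifs <;> omega

-- all full blocks 10 .. 10k+9
theorem pv_full (d : Nat) (hd : d < 10) : ∀ (k : Nat),
    (((List.range' 10 (10 * k)).map (Nat.digits 10)).flatten).count d
      = 10 * pvCnt d k + k := by
  intro k
  induction k with
  | zero => simp [pvCnt]
  | succ k ih =>
    have hsplit : List.range' 10 (10 * (k + 1)) = List.range' 10 (10 * k) ++ List.range' (10 * (k + 1)) 10 := by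
      have h := pv_range'_split 10 (10 * k) 10
      rw [show 10 * k + 10 = 10 * (k + 1) from by ring] at h
      rw [show (10 : Nat) + 10 * k = 10 * (k + 1) from by ring] at h
      exact h
    rw [hsplit, List.map_append, List.flatten_append, List.count_append, ih]
    have hb := pv_block (k + 1) d (by omega) hd 10 (by omega)
    rw [hb, pvCnt_succ]
    simp only [hd, if_pos]
    generalize (Nat.digits 10 (k + 1)).count d = C
    generalize pvCnt d k = Q
    ring

-- digits of 1..9 are the single digits
theorem pv_head (d : Nat) (hd : d < 10) :
    (((List.range' 1 9).map (Nat.digits 10)).flatten).count d = if 1 ≤ d then 1 else 0 := by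
  interval_cases d <;> decide

-- the recursion step of digit_counts, on the A side
theorem pv_core (N d : Nat) (hN : 10 ≤ N) (hd : d < 10) :
    pvCnt d N = (if 1 ≤ d then 1 else 0) + (N / 10 - 1) + (if d ≤ N % 10 then 1 else 0)
      + 10 * pvCnt d (N / 10 - 1) + (N % 10 + 1) * (Nat.digits 10 (N / 10)).count d := by
  have hq : 1 ≤ N / 10 := by omega
  have hr : N % 10 < 10 := by omega
  have hs1 : List.range' 1 N = List.range' 1 9 ++ List.range' 10 (N - 9) := by
    have h := pv_range'_split 1 9 (N - 9)
    rw [show 9 + (N - 9) = N from by omega] at h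
    exact h
  have hs2 : List.range' 10 (N - 9) = List.range' 10 (10 * (N / 10 - 1)) ++ List.range' (10 * (N / 10)) (N % 10 + 1) := by
    have h := pv_range'_split 10 (10 * (N / 10 - 1)) (N % 10 + 1)
    rw [show 10 * (N / 10 - 1) + (N % 10 + 1) = N - 9 from by omega] at h
    rw [show (10 : Nat) + 10 * (N / 10 - 1) = 10 * (N / 10) from by omega] at h
    exact h
  unfold pvCnt
  rw [hs1, hs2]
  simp only [List.map_append, List.flatten_append, List.count_append]
  rw [pv_head d hd, pv_full d hd (N / 10 - 1),
    pv_block (N / 10) d hq hd (N % 10 + 1) (by omega)]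
  have : (if d < N % 10 + 1 then 1 else 0) = (if d ≤ N % 10 then 1 else 0) := by
    split_ifs <;> omega
  rw [this]
  unfold pvCnt
  split_ifs <;> omega

-- indexing the 10-entry count vector
theorem pv_getD_counts (g : Nat → Int) (k : Nat) (hk : k < 10) :
    PySem.List.pyGetD ((List.range 10).map g) (k : Int) 0 = g k := by
  rw [PySem.List.pyGetD_natCast, PySem.List.getD_map_range g 10 k 0 hk]

-- pvDigitCounts computes exactly the ten counts pvCnt · N
theorem pv_counts_eq : ∀ (N : Nat), pvDigitCounts (N : Int) = (List.range 10).map (fun d => (pvCnt d N : Int)) := by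
  intro N
  induction N using Nat.strong_induction_on with
  | _ N ih =>
    rw [pvDigitCounts]
    by_cases h0 : N = 0
    · subst h0
      rw [dif_pos (by norm_num : ((0:Nat):Int) ≤ 0)]
      rw [show (List.range 10).map (fun d => (pvCnt d 0 : Int)) = (List.range 10).map (fun _ => (0:Int)) from
        List.map_congr_left (fun d _ => by simp [pvCnt])]
      decide
    · have hle : ¬ (N : Int) ≤ 0 := by omega
      simp only [hle, dif_neg, not_false_iff]
      by_cases h9 : N < 10
      · have h9' : (N : Int) < 10 := by omega
        simp only [h9', dif_pos]
        rw [show ((10:Int)) = ((10:Nat):Int) from by norm_num, PySem.List.pyRange_zero_nat 10, List.map_map]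
        apply List.map_congr_left
        intro d hd
        have hd10 : d < 10 := List.mem_range.mp hd
        have hN1 : 1 ≤ N := by omega
        simp only [Function.comp_apply]
        have hcnt : pvCnt d N = if 1 ≤ d ∧ d ≤ N then 1 else 0 := by
          interval_cases N <;> interval_cases d <;> decide
        rw [hcnt]
        split_ifs with hc hnat hnat <;> first | rfl | (exfalso; omega)
      · have h9' : ¬ (N : Int) < 10 := by omega
        simp only [h9', dif_neg, not_false_iff]
        rw [show ((10:Int)) = ((10:Nat):Int) from by norm_num, PySem.Int.mod_natCast, PySem.Int.floordiv_natCast]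
        have hq1 : 1 ≤ N / 10 := by omega
        have hcast : ((N / 10 : Nat) : Int) - 1 = ((N / 10 - 1 : Nat) : Int) := by omega
        rw [hcast, ih (N / 10 - 1) (by omega), pv_digitsOf_eq (N / 10),
          PySem.List.pyRange_zero_nat 10, List.map_map]
        apply List.map_congr_left
        intro d hd
        have hd10 : d < 10 := List.mem_range.mp hd
        simp only [Function.comp_apply]
        rw [pv_getD_counts _ d hd10, PySem.List.count_eq,
          List.count_map_of_injective _ _ Nat.cast_injective d,
          pv_core N d (by omega) hd10]
        rw [show (if 1 ≤ (d:Int) then (1:Int) else 0) = ((if 1 ≤ d then 1 else 0 : Nat) : Int) from by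
            split_ifs <;> first | rfl | (exfalso; omega),
          show (if (d:Int) ≤ ((N % 10 : Nat) : Int) then (1:Int) else 0) = ((if d ≤ N % 10 then 1 else 0 : Nat) : Int) from by
            split_ifs <;> first | rfl | (exfalso; omega)]
        push_cast [Nat.cast_sub hq1]
        ring

-- length and sum of a list of digits, from its ten counts
theorem pv_len_sum (l : List Nat) (h : ∀ x ∈ l, x < 10) :
    ((List.range 10).map (fun d => l.count d)).sum = l.length ∧
    ((List.range 10).map (fun d => d * l.count d)).sum = l.sum := by
  induction l with
  | nil => simp
  | cons e l ih =>
    obtain ⟨ih1, ih2⟩ := ih (fun x hx => h x (List.mem_cons_of_mem _ hx))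
    have he : e < 10 := h e (by simp)
    have hcnt : ∀ d, (e :: l).count d = l.count d + if e = d then 1 else 0 := by
      intro d; simp [List.count_cons]
    constructor
    · calc ((List.range 10).map (fun d => (e :: l).count d)).sum
          = ∑ d ∈ Finset.range 10, (l.count d + if e = d then 1 else 0) := by
            rw [show ((List.range 10).map (fun d => (e :: l).count d)).sum
                = ∑ d ∈ Finset.range 10, (e :: l).count d from rfl]
            exact Finset.sum_congr rfl (fun d _ => hcnt d)
        _ = l.length + 1 := by
            rw [Finset.sum_add_distrib,
              show (∑ d ∈ Finset.range 10, l.count d) = l.length from ih1,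
              Finset.sum_ite_eq (Finset.range 10) e (fun _ => 1)]
            simp [he]
        _ = (e :: l).length := by simp
    · calc ((List.range 10).map (fun d => d * (e :: l).count d)).sum
          = ∑ d ∈ Finset.range 10, (d * l.count d + d * (if e = d then 1 else 0)) := by
            rw [show ((List.range 10).map (fun d => d * (e :: l).count d)).sum
                = ∑ d ∈ Finset.range 10, d * (e :: l).count d from rfl]
            refine Finset.sum_congr rfl (fun d _ => ?_)
            rw [hcnt d]
            ring
        _ = l.sum + e := by
            rw [Finset.sum_add_distrib,
              show (∑ d ∈ Finset.range 10, d * l.count d) = l.sum from ih2]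
            congr 1
            rw [show (∑ d ∈ Finset.range 10, d * (if e = d then 1 else 0))
                = ∑ d ∈ Finset.range 10, (if e = d then d else 0) from
              Finset.sum_congr rfl (fun d _ => by split_ifs <;> simp)]
            rw [Finset.sum_ite_eq (Finset.range 10) e (fun d => d)]
            simp [he]
        _ = (e :: l).sum := by simp [Nat.add_comm]

-- the Int range 1..n is the cast of the Nat range
theorem pv_pyRange_nat : ∀ (N : Nat), PySem.List.pyRange 1 ((N : Int) + 1) = (List.range' 1 N).map (Nat.cast : Nat → Int) := by
  intro N
  induction N with
  | zero => simp [PySem.List.pyRange_one_eq_nil]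
  | succ N ih =>
    rw [show ((N + 1 : Nat) : Int) + 1 = (((N : Int) + 1) + 1) by push_cast; ring,
      PySem.List.pyRange_one_succ_right (by omega), ih, List.range'_concat]
    simp
    omega

-- ===== VERDICT (by name: the statement is the Claim_ definition above) =====
theorem A071268_spec : Claim_equal_A071268 := by
  intro n _ hpre
  unfold Spec_A071268
  simp only [A071268, A071268_alt]
  have hn1 : (1 : Int) ≤ n := hpre
  have hn : n = ((n.toNat : Nat) : Int) := by omega
  set N := n.toNat with hN
  have his : PySem.List.pyRange 1 (n + 1) = (List.range' 1 N).map (Nat.cast : Nat → Int) := by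
    rw [hn]; exact pv_pyRange_nat N
  set is := PySem.List.pyRange 1 (n + 1) with hisdef
  have hpos : ∀ i ∈ is, 0 < i := by
    intro i hi
    have := PySem.List.mem_pyRange_one.mp hi
    omega
  obtain ⟨h1, h2, h3, h4⟩ := pv_A_agg is hpos
  set dsn := ((List.range' 1 N).map (Nat.digits 10)).flatten with hdsn
  have hds : (is.map (fun i => Nat.digits 10 i.toNat)).flatten = dsn := by
    rw [his, List.map_map]
    congr 1
  rw [hds] at h1 h2 h3
  have hdig : ∀ x ∈ dsn, x < 10 := by
    intro x hx
    obtain ⟨l, hl, hxl⟩ := List.mem_flatten.mp hx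
    obtain ⟨m, _, rfl⟩ := List.mem_map.mp hl
    exact Nat.digits_lt_base (by norm_num) hxl
  obtain ⟨hlen, hsum⟩ := pv_len_sum dsn hdig
  have hcounts : pvDigitCounts n = (List.range 10).map (fun d => (pvCnt d N : Int)) := by
    rw [hn]; exact pv_counts_eq N
  have hcnt_dsn : ∀ d, pvCnt d N = dsn.count d := fun d => rfl
  rw [hcounts]
  -- total = length of the concatenation
  have htotal : ((List.range 10).map (fun d => (pvCnt d N : Int))).sum = (dsn.length : Int) := by
    have h1' : ((List.range 10).map (fun d => (pvCnt d N : Int))).sum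
        = (((List.range 10).map (fun d => pvCnt d N)).map (Nat.cast : Nat → Int)).sum := by
      rw [List.map_map]
      rfl
    rw [h1', ← Nat.cast_list_sum]
    exact congrArg _ hlen
  -- dsum = digit sum of the concatenation
  have hdsum : ((PySem.List.pyRange 0 10).map (fun d => d * PySem.List.pyGetD ((List.range 10).map (fun d => (pvCnt d N : Int))) d 0)).sum = (dsn.sum : Int) := by
    rw [show ((10:Int)) = ((10:Nat):Int) from by norm_num, PySem.List.pyRange_zero_nat 10, List.map_map]
    have : ((List.range 10).map ((fun d => d * PySem.List.pyGetD ((List.range 10).map (fun d => (pvCnt d N : Int))) d 0) ∘ (fun k : Nat => (k : Int))))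
        = (List.range 10).map (fun k : Nat => ((k * pvCnt k N : Nat) : Int)) := by
      apply List.map_congr_left
      intro k hk
      simp only [Function.comp_apply]
      rw [pv_getD_counts _ k (List.mem_range.mp hk)]
      push_cast
      ring
    rw [this]
    have h2' : ((List.range 10).map (fun k : Nat => ((k * pvCnt k N : Nat) : Int)))
        = ((List.range 10).map (fun k : Nat => k * pvCnt k N)).map (Nat.cast : Nat → Int) := by
      rw [List.map_map]
      rfl
    rw [h2', ← Nat.cast_list_sum]
    exact congrArg _ hsum
  rw [htotal, hdsum, h2]
  -- the ten factorials
  have hprod : (((List.range 10).map (fun d => (pvCnt d N : Int))).map (fun c => (c.toNat.factorial : Int))).prod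
      = ((List.range 10).map (fun d => ((dsn.count d).factorial : Int))).prod := by
    rw [List.map_map]
    apply congrArg
    apply List.map_congr_left
    intro d _
    simp [Function.comp, hcnt_dsn d]
  rw [hprod, ← pv_prod_eq _ dsn h3 h4]
  refine congrArg₂ PySem.Int.floordiv ?_ ?_
  · rw [h1]
    have e1 : ((dsn.length : Int) - 1).toNat = dsn.length - 1 := by omega
    have e2 : ((dsn.length : Int)).toNat = dsn.length := by omega
    rw [e1, e2]
  · ring
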